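-- pv_equiv track=rewrite | github.com/longtermrisk/marltoolbox | marltoolbox/scripts/aggregate_and_plot_tensorboard_data.py | _get_common_keys
-- ===== SOURCE A (Python) =====
-- def _get_common_keys(all_keys):
--     common_keys = []
--     for one_key in all_keys[0]:
--         common = True
--         for keys in all_keys:
--             if one_key not in keys:
--                 if one_key not in keys:
--                     common = False
--                     break
--         if common:
--             common_keys.append(one_key)
--     return common_keys
-- ===== SOURCE B (Python) =====
-- def _get_common_keys(all_keys):
--     n = len(all_keys)
--     counts = {}
--     for keys in all_keys:
--         for k in set(keys):
--             counts[k] = counts.get(k, 0) + 1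
--     return [k for k in all_keys[0] if counts.get(k, 0) == n]
-- ===== Notes on version B (the rewrite author's own statement) =====
-- stated objective: alternative
-- what changed: Replaces A's per-candidate rescan of every list with a two-pass algorithm: one counting pass builds a dict mapping each key to the number of lists containing it (via each list's unique keys), then a single filter over the first list keeps keys whose count equals len(all_keys).
-- outside the precondition, e.g. on _get_common_keys([]): A raises IndexError, B raises IndexError
import Mathlib
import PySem

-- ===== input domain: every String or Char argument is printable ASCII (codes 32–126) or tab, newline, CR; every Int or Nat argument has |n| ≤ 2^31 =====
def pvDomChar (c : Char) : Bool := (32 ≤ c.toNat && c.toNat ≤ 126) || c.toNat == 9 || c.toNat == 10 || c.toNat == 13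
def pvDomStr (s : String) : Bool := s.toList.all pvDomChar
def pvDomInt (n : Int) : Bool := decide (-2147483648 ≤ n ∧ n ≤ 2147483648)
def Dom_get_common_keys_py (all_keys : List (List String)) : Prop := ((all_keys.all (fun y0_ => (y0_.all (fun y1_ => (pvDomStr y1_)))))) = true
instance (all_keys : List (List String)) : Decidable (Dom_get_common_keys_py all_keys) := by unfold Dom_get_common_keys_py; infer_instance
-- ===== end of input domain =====

-- B replaces A's per-candidate rescan of all lists with one counting pass (unique keys of
-- each list bump a dict counter) followed by a single filter over the first list.

-- ===== PORT A =====
-- inner 'for keys in all_keys' loop of A: common stays True unless some list misses one_key (break)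
def pvAInner (one_key : String) : List (List String) → Bool
  | [] => true
  | keys :: rest =>
    if one_key ∉ keys then
      (if one_key ∉ keys then false else pvAInner one_key rest)
    else pvAInner one_key rest

def get_common_keys_py (all_keys : List (List String)) : List String :=
  match PySem.List.pyGet? all_keys 0 with
  | none => []   -- Python raises IndexError here; excluded by Pre_
  | some first =>
    first.foldl (fun common_keys one_key =>
      if pvAInner one_key all_keys then common_keys ++ [one_key] else common_keys) []

-- ===== PORT B =====
def get_common_keys_py_alt (all_keys : List (List String)) : List String :=
  let n : Int := all_keys.length
  let counts : PySem.Dict String Int :=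
    all_keys.foldl (fun d keys =>
      (PySem.Set.ofList keys).foldl (fun d k => d.modify k 0 (· + 1)) d) PySem.Dict.empty
  match PySem.List.pyGet? all_keys 0 with
  | none => []   -- Python raises IndexError here; excluded by Pre_
  | some first => first.filter (fun k => counts.getD k 0 == n)

-- ===== PRECONDITION & SPEC =====
-- A (and B) raise IndexError on all_keys = [] (all_keys[0]); exactly that input is excluded.
def Pre_get_common_keys_py (all_keys : List (List String)) : Prop := all_keys ≠ []
instance (all_keys : List (List String)) : Decidable (Pre_get_common_keys_py all_keys) := by unfold Pre_get_common_keys_py; infer_instance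
def pvWitness_get_common_keys_py : List (List String) := [["a", "b", "a"], ["b", "a"]]

def Spec_get_common_keys_py (all_keys : List (List String)) (out : List String) : Prop := out = get_common_keys_py_alt all_keys
instance (all_keys : List (List String)) (out : List String) : Decidable (Spec_get_common_keys_py all_keys out) := by unfold Spec_get_common_keys_py; infer_instance

-- ===== CLAIM (what is proved, stated in full; the proofs are below) =====
def Claim_equal_get_common_keys_py : Prop := ∀ (all_keys : List (List String)), Dom_get_common_keys_py all_keys → Pre_get_common_keys_py all_keys → Spec_get_common_keys_py all_keys (get_common_keys_py all_keys)

-- ===== LEMMAS AND PROOFS =====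

-- A's inner loop decides "every list contains one_key"
theorem pvAInner_eq_all (one_key : String) (L : List (List String)) :
    pvAInner one_key L = L.all (fun keys => decide (one_key ∈ keys)) := by
  induction L with
  | nil => rfl
  | cons keys rest ih =>
    simp only [pvAInner, List.all_cons]
    by_cases h : one_key ∈ keys <;> simp [h, ih]

-- B's counter maps k to the number of lists containing k
theorem pvCounts_getD (L : List (List String)) (d : PySem.Dict String Int) (k : String) :
    (L.foldl (fun d keys =>
      (PySem.Set.ofList keys).foldl (fun d k => d.modify k 0 (· + 1)) d) d).getD k 0
    = d.getD k 0 + (L.countP (fun keys => decide (k ∈ keys)) : Int) := by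
  induction L generalizing d with
  | nil => simp
  | cons keys rest ih =>
    rw [List.foldl_cons, ih, PySem.Dict.getD_foldl_modify_add_one]
    rw [List.countP_cons]
    by_cases h : k ∈ keys
    · rw [List.count_eq_one_of_mem (PySem.Set.nodup_ofList keys) ((PySem.Set.mem_ofList keys k).mpr h)]
      simp [h]; ring
    · rw [List.count_eq_zero_of_not_mem (fun hm => h ((PySem.Set.mem_ofList keys k).mp hm))]
      simp [h]

theorem pvCond_eq (all_keys : List (List String)) (k : String) :
    ((all_keys.foldl (fun d keys =>
        (PySem.Set.ofList keys).foldl (fun d k => d.modify k 0 (· + 1)) d)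
        PySem.Dict.empty).getD k 0 == (all_keys.length : Int))
    = pvAInner k all_keys := by
  rw [pvCounts_getD, pvAInner_eq_all, PySem.Dict.getD_empty, zero_add]
  by_cases h : ∀ keys ∈ all_keys, k ∈ keys
  · have hc : all_keys.countP (fun keys => decide (k ∈ keys)) = all_keys.length :=
      List.countP_eq_length.mpr (by simpa using h)
    have ha : all_keys.all (fun keys => decide (k ∈ keys)) = true := by simpa using h
    simp [hc, ha]
  · have ha : all_keys.all (fun keys => decide (k ∈ keys)) = false := by
      rcases not_forall.mp h with ⟨keys, hk⟩
      rcases Classical.not_imp.mp hk with ⟨hm, hnm⟩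
      simp only [List.all_eq_false]
      exact ⟨keys, hm, by simpa using hnm⟩
    have hne : all_keys.countP (fun keys => decide (k ∈ keys)) ≠ all_keys.length :=
      fun he => h (by simpa using List.countP_eq_length.mp he)
    rw [ha]
    simp only [beq_eq_false_iff_ne, ne_eq, Nat.cast_inj]
    exact hne

-- ===== VERDICT (by name: the statement is the Claim_ definition above) =====
theorem get_common_keys_py_spec : Claim_equal_get_common_keys_py := by
  intro all_keys _ hpre
  unfold Spec_get_common_keys_py get_common_keys_py get_common_keys_py_alt
  obtain ⟨first, rest, rfl⟩ : ∃ f r, all_keys = f :: r := by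
    cases all_keys with
    | nil => exact absurd rfl hpre
    | cons f r => exact ⟨f, r, rfl⟩
  rw [PySem.List.pyGet?_zero_cons]
  dsimp only
  rw [PySem.List.foldl_append_if_eq_filter]
  simp only [List.nil_append]
  apply List.filter_congr
  intro k _
  rw [pvCond_eq]
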